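-- pv_equiv track=rewrite | github.com/KMate-ISD/Embedded | MIRO_RFID/miro_mifare_ul_rw.py | break_down_text
-- ===== SOURCE A (Python) =====
-- def break_down_text(text):
--     size = len(text)
--     ret = []
--     buffer = []
--     for i in range(size):
--         buffer.append(text[i])
--         if i%4 == 3:
--             ret.append(buffer[:])
--             buffer.clear()
--     if buffer:
--         ret.append(buffer[:])
--     ret_bytes = []
--     for block in ret:
--         block_bytes = [ord(i) for i in block]
--         ret_bytes.append(block_bytes)
--     for block in ret_bytes:
--         block.extend([0]*(16 - len(block)))
--     return(ret_bytes)
-- ===== SOURCE B (Python) =====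
-- def break_down_text(text):
--     return [[ord(c) for c in text[i:i+4]] + [0] * (16 - len(text[i:i+4]))
--             for i in range(0, len(text), 4)]
-- ===== Notes on version B (the rewrite author's own statement) =====
-- stated objective: simpler
-- what changed: Replaces the per-character accumulation with an i%4 counter, a mutable buffer, and two follow-up passes (ord-mapping, zero-padding) by a single block-wise comprehension over range(0, len(text), 4) that slices each 4-char block and builds its padded ord list in one step.
import Mathlib
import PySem

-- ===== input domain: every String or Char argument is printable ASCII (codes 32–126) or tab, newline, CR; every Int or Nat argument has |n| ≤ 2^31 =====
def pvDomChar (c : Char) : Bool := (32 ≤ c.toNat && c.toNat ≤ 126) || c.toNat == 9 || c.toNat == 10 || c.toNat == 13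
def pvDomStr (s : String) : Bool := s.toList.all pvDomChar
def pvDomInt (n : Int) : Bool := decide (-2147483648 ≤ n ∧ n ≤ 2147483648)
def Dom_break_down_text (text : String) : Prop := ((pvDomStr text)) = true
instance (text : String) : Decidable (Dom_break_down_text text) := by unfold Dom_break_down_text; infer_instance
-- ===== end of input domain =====

-- B replaces A's per-character buffering with an i%4 counter and two follow-up passes by a
-- single block-wise comprehension over range(0, len(text), 4); objective: simpler.

-- ===== PORT A =====
def break_down_text (text : String) : List (List Int) :=
  let size : Int := PySem.Str.len text
  let st := (PySem.List.pyRange 0 size 1).foldl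
      (fun (s : List (List Char) × List Char) i =>
        let buffer := s.2 ++ [PySem.List.pyGetD text.toList i ' ']
        if PySem.Int.mod i 4 = 3 then (s.1 ++ [buffer], ([] : List Char)) else (s.1, buffer))
      ([], [])
  let ret := if st.2 ≠ [] then st.1 ++ [st.2] else st.1
  let ret_bytes := ret.map (fun block => block.map (fun c => (c.toNat : Int)))
  ret_bytes.map (fun block => block ++ List.replicate (16 - block.length) 0)

-- ===== PORT B =====
def break_down_text_alt (text : String) : List (List Int) :=
  (PySem.List.pyRange 0 (PySem.Str.len text) 4).map (fun i =>
    let block := PySem.List.slice text.toList (some i) (some (i + 4))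
    block.map (fun c => (c.toNat : Int)) ++ List.replicate (16 - block.length) 0)

-- ===== PRECONDITION & SPEC =====
def Spec_break_down_text (text : String) (out : List (List Int)) : Prop := out = break_down_text_alt text
instance (text : String) (out : List (List Int)) : Decidable (Spec_break_down_text text out) := by unfold Spec_break_down_text; infer_instance

-- ===== CLAIM (what is proved, stated in full; the proofs are below) =====
def Claim_equal_break_down_text : Prop := ∀ (text : String), Dom_break_down_text text → Spec_break_down_text text (break_down_text text)

-- ===== LEMMAS AND PROOFS =====

/-- The 4-character chunking both programs compute, as a structural recursion. -/
def chunks4 : List Char → List (List Char)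
  | [] => []
  | a :: b :: c :: d :: rest => [a, b, c, d] :: chunks4 rest
  | cs => [cs]

/-- The padded ord-list both programs build from a block. -/
def padOrd (b : List Char) : List Int :=
  b.map (fun c => (c.toNat : Int)) ++ List.replicate (16 - b.length) 0

/-- A's loop body, on an (index, char) pair. -/
def stepA (s : List (List Char) × List Char) (p : Int × Char) : List (List Char) × List Char :=
  let buffer := s.2 ++ [p.2]
  if PySem.Int.mod p.1 4 = 3 then (s.1 ++ [buffer], ([] : List Char)) else (s.1, buffer)

/-- A's finalization: flush a nonempty buffer. -/
def finA (st : List (List Char) × List Char) : List (List Char) :=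
  if st.2 ≠ [] then st.1 ++ [st.2] else st.1

/-- Invariant of A's character loop: starting at an index divisible by 4 with an empty
    buffer, finalizing the fold appends exactly the 4-chunks of the remaining characters. -/
lemma loopA (cs : List Char) : ∀ (q : Nat) (ret : List (List Char)),
    finA ((PySem.List.enumerate cs (4 * (q : Int))).foldl stepA (ret, [])) = ret ++ chunks4 cs := by
  induction cs using chunks4.induct with
  | case1 =>
      intro q ret
      simp [PySem.List.enumerate_nil, finA, chunks4]
  | case2 a b c d rest ih =>
      intro q ret
      simp only [PySem.List.enumerate_cons, List.foldl_cons, stepA,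
        PySem.Int.mod_eq_emod_of_pos (show (0:Int) < 4 by norm_num)]
      have c0 : ¬((4*(q:Int)) % 4 = 3) := by omega
      have c1 : ¬((4*(q:Int)+1) % 4 = 3) := by omega
      have c2 : ¬((4*(q:Int)+1+1) % 4 = 3) := by omega
      have c3 : ((4*(q:Int)+1+1+1) % 4 = 3) := by omega
      simp only [c0, c1, c2, c3, if_true, if_neg, not_false_iff, List.nil_append,
        List.cons_append]
      rw [show (4 : Int) * (q:Int) + 1 + 1 + 1 + 1 = 4 * (((q+1) : Nat) : Int) from by push_cast; ring]
      rw [ih (q+1) (ret ++ [[a, b, c, d]])]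
      simp [chunks4]
  | case3 cs h1 h2 =>
      intro q ret
      have c0 : ¬((4*(q:Int)) % 4 = 3) := by omega
      have c1 : ¬((4*(q:Int)+1) % 4 = 3) := by omega
      have c2 : ¬((4*(q:Int)+1+1) % 4 = 3) := by omega
      rcases cs with _ | ⟨a, _ | ⟨b, _ | ⟨c, _ | ⟨d, rest⟩⟩⟩⟩
      · exact (h1 rfl).elim
      · simp only [PySem.List.enumerate_cons, PySem.List.enumerate_nil, List.foldl_cons,
          List.foldl_nil, stepA, PySem.Int.mod_eq_emod_of_pos (show (0:Int) < 4 by norm_num)]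
        simp [finA, chunks4]
      · simp only [PySem.List.enumerate_cons, PySem.List.enumerate_nil, List.foldl_cons,
          List.foldl_nil, stepA, PySem.Int.mod_eq_emod_of_pos (show (0:Int) < 4 by norm_num)]
        simp [finA, chunks4]
      · simp only [PySem.List.enumerate_cons, PySem.List.enumerate_nil, List.foldl_cons,
          List.foldl_nil, stepA, PySem.Int.mod_eq_emod_of_pos (show (0:Int) < 4 by norm_num)]
        simp [c2, finA, chunks4]
      · exact ((h2 a b c d rest) rfl).elim

/-- Flushing an explicit if, as `finA`. -/
lemma finA_eq (st : List (List Char) × List Char) :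
    (if st.2 ≠ [] then st.1 ++ [st.2] else st.1) = finA st := rfl

/-- A computes the padded ord lists of the 4-chunks. -/
lemma breakA_eq (text : String) :
    break_down_text text = (chunks4 text.toList).map padOrd := by
  have key : (PySem.List.pyRange 0 (PySem.Str.len text) 1).foldl
      (fun (s : List (List Char) × List Char) i =>
        let buffer := s.2 ++ [PySem.List.pyGetD text.toList i ' ']
        if PySem.Int.mod i 4 = 3 then (s.1 ++ [buffer], ([] : List Char)) else (s.1, buffer))
      ([], [])
      = (PySem.List.enumerate text.toList 0).foldl stepA ([], []) := by
    rw [show PySem.Str.len text = PySem.List.len text.toList from by simp,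
        PySem.List.enumerate_eq_map_pyRange text.toList ' ', List.foldl_map]
    rfl
  have hloop := loopA text.toList 0 []
  simp only [Nat.cast_zero, mul_zero] at hloop
  simp only [break_down_text]
  rw [key, finA_eq, hloop]
  simp only [List.nil_append, List.map_map]
  refine List.map_congr_left (fun b _ => ?_)
  simp [padOrd]

/-- The step-4 index range with slicing produces the same 4-chunks. -/
lemma chunks_eq_takes (cs : List Char) :
    (List.range ((cs.length + 3) / 4)).map (fun k => (cs.drop (4 * k)).take 4) = chunks4 cs := by
  induction cs using chunks4.induct with
  | case1 => simp [chunks4]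
  | case2 a b c d rest ih =>
      have hlen : ((a :: b :: c :: d :: rest).length + 3) / 4 = (rest.length + 3) / 4 + 1 := by
        simp [List.length_cons]; omega
      rw [hlen, List.range_succ_eq_map]
      simp only [List.map_cons, List.map_map, chunks4]
      refine congrArg₂ List.cons (by simp) ?_
      rw [← ih]
      refine List.map_congr_left (fun k _ => ?_)
      simp only [Function.comp_apply]
      rw [show 4 * (k + 1) = 4 * k + 1 + 1 + 1 + 1 from by omega]
      simp
  | case3 cs h1 h2 =>
      rcases cs with _ | ⟨a, _ | ⟨b, _ | ⟨c, _ | ⟨d, rest⟩⟩⟩⟩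
      · exact (h1 rfl).elim
      · simp [chunks4, List.range_succ]
      · simp [chunks4, List.range_succ]
      · simp [chunks4, List.range_succ]
      · exact ((h2 a b c d rest) rfl).elim

/-- B computes the padded ord lists of the 4-chunks. -/
lemma breakB_eq (text : String) :
    break_down_text_alt text = (chunks4 text.toList).map padOrd := by
  unfold break_down_text_alt
  simp only [PySem.Str.len_eq]
  rw [PySem.List.pyRange_of_pos 0 (text.toList.length : Int) (by norm_num : (0:Int) < 4)]
  rw [List.map_map]
  have hcnt : (if (0:Int) < (text.toList.length : Int)
      then (((text.toList.length : Int) - 0 + 4 - 1) / 4).toNat else 0)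
      = (text.toList.length + 3) / 4 := by
    split_ifs with h
    · omega
    · omega
  rw [hcnt, ← chunks_eq_takes text.toList, List.map_map]
  refine List.map_congr_left (fun k _ => ?_)
  simp only [Function.comp_apply, zero_add]
  have hsl : PySem.List.slice text.toList (some ((4:Int) * (k:Int))) (some ((4:Int) * (k:Int) + 4))
      = (text.toList.drop (4 * k)).take 4 := by
    rw [show ((4:Int) * (k:Int)) = ((4 * k : Nat) : Int) from by push_cast; ring,
        show ((4 * k : Nat) : Int) + 4 = ((4 * k : Nat) : Int) + ((4 : Nat) : Int) from by norm_num]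
    exact PySem.List.slice_natCast_add text.toList (4 * k) 4
  rw [hsl]
  rfl

-- ===== VERDICT (by name: the statement is the Claim_ definition above) =====
theorem break_down_text_spec : Claim_equal_break_down_text := by
  intro text _
  unfold Spec_break_down_text
  rw [breakA_eq, breakB_eq]
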